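-- pv_equiv track=rewrite | github.com/Gowthami03B/practiceProblems | pairWithGivenDiff.py | solve
-- ===== SOURCE A (Python) =====
-- def solve(A, B):
--         i, j = 0, 1
--         A.sort()
--         while i < len(A) and j < len(A):
--             if i!=j and abs(A[j] - A[i]) == B:
--                 return 1
--             if abs(A[j] - A[i])  < B:
--                 j += 1
--             else:
--                 i += 1
--         return 0
-- ===== SOURCE B (Python) =====
-- def solve(A, B):
--     A.sort()  # preserve A's in-place sort of the argument
--     if B < 0:
--         return 0
--     if B == 0:
--         return 1 if len(set(A)) < len(A) else 0
--     s = set(A)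
--     return 1 if any(x + B in s for x in s) else 0
-- ===== Notes on version B (the rewrite author's own statement) =====
-- stated objective: alternative
-- what changed: Replaces the sorted two-pointer sweep with hash-set reasoning: a duplicate test via len(set(A)) for B==0 and a one-pass 'x+B in set(A)' membership scan for B>0 (sort kept only for the argument mutation).
-- intended difference: When B==0, A has a duplicate, and the three smallest sorted values are pairwise distinct, A returns 0 (it only ever compares elements against sorted index 1, so it misses the duplicate) while B returns 1, the correct answer to 'does some pair have absolute difference B'. — e.g. on solve([1, 2, 3, 3], 0): A returns 0, B returns 1
import Mathlib
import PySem

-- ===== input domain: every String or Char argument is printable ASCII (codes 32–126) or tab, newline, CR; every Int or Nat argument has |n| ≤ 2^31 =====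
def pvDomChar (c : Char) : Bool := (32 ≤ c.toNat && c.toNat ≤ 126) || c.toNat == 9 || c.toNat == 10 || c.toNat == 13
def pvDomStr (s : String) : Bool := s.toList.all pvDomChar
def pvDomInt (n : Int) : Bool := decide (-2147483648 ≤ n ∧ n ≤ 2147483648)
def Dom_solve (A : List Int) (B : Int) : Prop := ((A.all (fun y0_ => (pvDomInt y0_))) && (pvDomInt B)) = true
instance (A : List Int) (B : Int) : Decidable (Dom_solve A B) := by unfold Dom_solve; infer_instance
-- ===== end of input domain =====

-- B replaces A's sorted two-pointer sweep by set reasoning (duplicate test via set size for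
-- B == 0, 'x + B in set' membership scan for B > 0); both versions sort the argument list in
-- place (the equivalence proved here is about the return value; the mutation is identical).

-- ===== PORT A =====
-- the while loop of A: state (i, j) over the sorted list s; the fuel only bounds the number of
-- iterations (each step increments i or j, so 2*len(s)+1 iterations are never reached)
def solveLoop (B : Int) (s : List Int) (fuel i j : Nat) : Int :=
  match fuel with
  | 0 => 0
  | n + 1 =>
    if i < s.length ∧ j < s.length then
      if i ≠ j ∧ |s.getD j 0 - s.getD i 0| = B then 1
      else if |s.getD j 0 - s.getD i 0| < B then solveLoop B s n i (j + 1)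
      else solveLoop B s n (i + 1) j
    else 0

def solve (A : List Int) (B : Int) : Int :=
  let s := PySem.List.sorted A (fun x => x) false
  solveLoop B s (2 * s.length + 1) 0 1

-- ===== PORT B =====
def solve_alt (A : List Int) (B : Int) : Int :=
  let sA := PySem.List.sorted A (fun x => x) false  -- A.sort() (mutation mirror)
  if B < 0 then 0
  else if B = 0 then
    (if (PySem.Set.ofList sA).length < sA.length then 1 else 0)
  else
    let st := PySem.Set.ofList sA
    (if st.any (fun x => PySem.Set.contains st (x + B)) then 1 else 0)

-- ===== PRECONDITION & SPEC =====
-- When B == 0 and A contains a duplicate but the three smallest sorted values are pairwise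
-- distinct, A returns 0 (its loop only ever compares elements against sorted index 1, so it
-- misses the duplicate) while B returns 1, the correct answer to "does some pair of elements
-- have absolute difference B".
def D_solve (A : List Int) (B : Int) : Prop :=
  B = 0 ∧ ¬ A.Nodup ∧
  (PySem.List.sorted A (fun x => x) false).getD 0 0 ≠ (PySem.List.sorted A (fun x => x) false).getD 1 0 ∧
  (PySem.List.sorted A (fun x => x) false).getD 1 0 ≠ (PySem.List.sorted A (fun x => x) false).getD 2 0
instance (A : List Int) (B : Int) : Decidable (D_solve A B) := by unfold D_solve; infer_instance

def Spec_solve (A : List Int) (B : Int) (out : Int) : Prop := ¬ D_solve A B → out = solve_alt A B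
instance (A : List Int) (B : Int) (out : Int) : Decidable (Spec_solve A B out) := by unfold Spec_solve; infer_instance

def pvDiffWitness_solve : List Int × Int := ([1, 2, 3, 3], 0)
def pvDiffWitnessOut_solve : Int × Int := (0, 1)

-- ===== CLAIM (what is proved, stated in full; the proofs are below) =====
def Claim_unchanged_solve : Prop := ∀ (A : List Int) (B : Int), Dom_solve A B → Spec_solve A B (solve A B)
def Claim_changed_solve : Prop := Dom_solve (pvDiffWitness_solve.1) (pvDiffWitness_solve.2) ∧ D_solve (pvDiffWitness_solve.1) (pvDiffWitness_solve.2) ∧ solve (pvDiffWitness_solve.1) (pvDiffWitness_solve.2) = pvDiffWitnessOut_solve.1 ∧ solve_alt (pvDiffWitness_solve.1) (pvDiffWitness_solve.2) = pvDiffWitnessOut_solve.2 ∧ pvDiffWitnessOut_solve.1 ≠ pvDiffWitnessOut_solve.2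
def Claim_exact_solve : Prop := ∀ (A : List Int) (B : Int), Dom_solve A B → D_solve A B → solve A B ≠ solve_alt A B

-- ===== LEMMAS AND PROOFS =====

-- sorted lists are monotone at getD
lemma getD_mono (s : List Int) (hs : s.Pairwise (· ≤ ·)) {p q : Nat} (hpq : p ≤ q)
    (hq : q < s.length) : s.getD p 0 ≤ s.getD q 0 := by
  rw [List.getD_eq_getElem s 0 (lt_of_le_of_lt hpq hq), List.getD_eq_getElem s 0 hq]
  rcases Nat.lt_or_eq_of_le hpq with h | h
  · exact List.pairwise_iff_getElem.mp hs p q _ _ h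
  · subst h; rfl

-- the loop only returns 0 or 1
lemma loop01 (B : Int) (s : List Int) :
    ∀ n i j, solveLoop B s n i j = 0 ∨ solveLoop B s n i j = 1 := by
  intro n
  induction n with
  | zero => intro i j; exact Or.inl rfl
  | succ n ih =>
    intro i j
    rw [solveLoop]
    by_cases h : i < s.length ∧ j < s.length
    · rw [if_pos h]
      split_ifs with h1 h2
      · exact Or.inr rfl
      · exact ih i (j + 1)
      · exact ih (i + 1) j
    · rw [if_neg h]; exact Or.inl rfl

-- if the loop returns 1 it has seen a genuine pair
lemma loop_sound (B : Int) (s : List Int) :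
    ∀ n i j, solveLoop B s n i j = 1 →
    ∃ p q, p < s.length ∧ q < s.length ∧ p ≠ q ∧ |s.getD q 0 - s.getD p 0| = B := by
  intro n
  induction n with
  | zero => intro i j h1; exact absurd h1 (by norm_num [solveLoop])
  | succ n ih =>
    intro i j h1
    rw [solveLoop] at h1
    by_cases h : i < s.length ∧ j < s.length
    · rw [if_pos h] at h1
      split_ifs at h1 with hg1 hg2
      · exact ⟨i, j, h.1, h.2, hg1.1, hg1.2⟩
      · exact ih i (j + 1) h1
      · exact ih (i + 1) j h1
    · rw [if_neg h] at h1
      exact absurd h1 (by norm_num)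

-- two-pointer completeness for B > 0: enough fuel and the invariant i ≤ j given, a vanishing
-- loop means no pair (p, q) with i ≤ p < q, j ≤ q has difference exactly B
lemma loop_complete (B : Int) (s : List Int) (hs : s.Pairwise (· ≤ ·)) (hB : 0 < B) :
    ∀ n i j, 2 * s.length - (i + j) < n → i ≤ j → solveLoop B s n i j = 0 →
    ∀ p q, i ≤ p → p < q → j ≤ q → q < s.length → s.getD q 0 - s.getD p 0 ≠ B := by
  intro n
  induction n with
  | zero => intro i j hm; omega
  | succ n ih =>
    intro i j hm hij h0 p q hip hpq hjq hq
    rw [solveLoop] at h0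
    by_cases h : i < s.length ∧ j < s.length
    · rw [if_pos h] at h0
      split_ifs at h0 with hg1 hg2
      · exact absurd h0 (by norm_num)
      · -- j advanced: pairs ending exactly at j are smaller than B
        by_cases hqj : q = j
        · subst hqj
          have h1 : s.getD i 0 ≤ s.getD p 0 := getD_mono s hs hip (by omega)
          have h2 : s.getD q 0 - s.getD i 0 ≤ |s.getD q 0 - s.getD i 0| := le_abs_self _
          intro he; omega
        · exact ih i (j + 1) (by omega) (by omega) h0 p q hip hpq (by omega) hq
      · -- i advanced: here i < j and the (i, j) gap already exceeds B
        have hij' : i ≠ j := by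
          intro e; subst e
          simp only [sub_self, abs_zero] at hg2
          omega
        have habs : ¬ |s.getD j 0 - s.getD i 0| = B := fun e => hg1 ⟨hij', e⟩
        have hmono : s.getD i 0 ≤ s.getD j 0 := getD_mono s hs (by omega) h.2
        by_cases hpi : p = i
        · subst hpi
          have h1 : s.getD j 0 ≤ s.getD q 0 := getD_mono s hs hjq hq
          rw [abs_of_nonneg (by omega)] at hg2 habs
          intro he; omega
        · exact ih (i + 1) j (by omega) (by omega) h0 p q (by omega) hpq hjq hq
    · exact absurd (⟨by omega, by omega⟩ : i < s.length ∧ j < s.length) h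

-- for B < 0 the loop only ever advances i and returns 0
lemma loop_neg (B : Int) (s : List Int) (hB : B < 0) :
    ∀ n i j, solveLoop B s n i j = 0 := by
  intro n
  induction n with
  | zero => intro i j; rfl
  | succ n ih =>
    intro i j
    rw [solveLoop]
    by_cases h : i < s.length ∧ j < s.length
    · rw [if_pos h]
      have ha : 0 ≤ |s.getD j 0 - s.getD i 0| := abs_nonneg _
      split_ifs with h1 h2
      · omega
      · omega
      · exact ih (i + 1) j
    · rw [if_neg h]

-- for B = 0, once i ≥ 2 the loop compares s[i] only against s[1] and fails
lemma loopB0_tail (s : List Int) (hs : s.Pairwise (· ≤ ·)) (h12 : s.getD 1 0 < s.getD 2 0) :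
    ∀ n i, 2 ≤ i → solveLoop 0 s n i 1 = 0 := by
  intro n
  induction n with
  | zero => intro i hi; rfl
  | succ n ih =>
    intro i hi
    rw [solveLoop]
    by_cases h : i < s.length ∧ 1 < s.length
    · rw [if_pos h]
      have hmono : s.getD 2 0 ≤ s.getD i 0 := getD_mono s hs hi h.1
      have ha : 0 ≤ |s.getD 1 0 - s.getD i 0| := abs_nonneg _
      split_ifs with h1 h2
      · exfalso
        have := h1.2
        rw [abs_eq_zero] at this
        omega
      · omega
      · exact ih (i + 1) (by omega)
    · rw [if_neg h]

-- for B = 0 with the three smallest values pairwise distinct, the loop returns 0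
lemma loopB0_miss (s : List Int) (hs : s.Pairwise (· ≤ ·))
    (h01 : s.getD 0 0 ≠ s.getD 1 0) (h12 : s.getD 1 0 ≠ s.getD 2 0) :
    solveLoop 0 s (2 * s.length + 1) 0 1 = 0 := by
  by_cases hlen : 1 < s.length
  · obtain ⟨m, hm⟩ : ∃ m, 2 * s.length + 1 = m + 1 + 1 + 1 := ⟨2 * s.length - 2, by omega⟩
    rw [hm, solveLoop, if_pos ⟨by omega, hlen⟩]
    rw [if_neg (by rintro ⟨-, he⟩; rw [abs_eq_zero] at he; omega)]
    rw [if_neg (by have := abs_nonneg (s.getD 1 0 - s.getD 0 0); omega)]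
    show solveLoop 0 s (m + 1 + 1) 1 1 = 0
    rw [solveLoop, if_pos ⟨hlen, hlen⟩]
    rw [if_neg (by rintro ⟨he, -⟩; exact he rfl)]
    rw [if_neg (by have := abs_nonneg (s.getD 1 0 - s.getD 1 0); omega)]
    show solveLoop 0 s (m + 1) 2 1 = 0
    by_cases h2 : 2 < s.length
    · have hle : s.getD 1 0 ≤ s.getD 2 0 := getD_mono s hs (by omega) h2
      exact loopB0_tail s hs (by omega) (m + 1) 2 (by omega)
    · rw [solveLoop, if_neg (by omega)]
  · rw [solveLoop, if_neg (by omega)]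

-- for B = 0 with a duplicate among the three smallest values, the loop finds it
lemma loopB0_hit (s : List Int) (hlen : 2 ≤ s.length)
    (hdup : s.getD 0 0 = s.getD 1 0 ∨ (2 < s.length ∧ s.getD 0 0 ≠ s.getD 1 0 ∧ s.getD 1 0 = s.getD 2 0)) :
    solveLoop 0 s (2 * s.length + 1) 0 1 = 1 := by
  obtain ⟨m, hm⟩ : ∃ m, 2 * s.length + 1 = m + 1 + 1 + 1 := ⟨2 * s.length - 2, by omega⟩
  rcases hdup with h | ⟨h2, h01, h12⟩
  · rw [hm, solveLoop, if_pos ⟨by omega, by omega⟩]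
    rw [if_pos ⟨by omega, by rw [h, sub_self, abs_zero]⟩]
  · rw [hm, solveLoop, if_pos ⟨by omega, by omega⟩]
    rw [if_neg (by rintro ⟨-, he⟩; rw [abs_eq_zero] at he; omega)]
    rw [if_neg (by have := abs_nonneg (s.getD 1 0 - s.getD 0 0); omega)]
    show solveLoop 0 s (m + 1 + 1) 1 1 = 1
    rw [solveLoop, if_pos ⟨by omega, by omega⟩]
    rw [if_neg (by rintro ⟨he, -⟩; exact he rfl)]
    rw [if_neg (by have := abs_nonneg (s.getD 1 0 - s.getD 1 0); omega)]
    show solveLoop 0 s (m + 1) 2 1 = 1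
    rw [solveLoop, if_pos ⟨h2, by omega⟩]
    rw [if_pos ⟨by omega, by rw [h12]; norm_num⟩]

-- PySem.Set.ofList is a sublist of its argument
lemma ofList_sublist (xs : List Int) : (PySem.Set.ofList xs).Sublist xs := by
  induction xs with
  | nil => simp [PySem.Set.ofList_nil]
  | cons x xs ih =>
    rw [PySem.Set.ofList_cons]
    simp only [PySem.Set.discard]
    exact List.Sublist.cons₂ x (List.filter_sublist.trans ih)

-- the set of a list with duplicates is strictly shorter
lemma ofList_len_lt (xs : List Int) (h : ¬ xs.Nodup) :
    (PySem.Set.ofList xs).length < xs.length := by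
  rcases Nat.lt_or_ge (PySem.Set.ofList xs).length xs.length with hlt | hge
  · exact hlt
  · exfalso
    have hsub := ofList_sublist xs
    have heq : PySem.Set.ofList xs = xs :=
      hsub.eq_of_length (le_antisymm (hsub.length_le) hge)
    exact h (heq ▸ PySem.Set.nodup_ofList xs)

-- an in-range getD is a member
lemma getD_mem_self (s : List Int) {k : Nat} (h : k < s.length) : s.getD k 0 ∈ s := by
  rw [List.getD_eq_getElem s 0 h]; exact List.getElem_mem h

-- a list of length ≤ 1 has no duplicates
lemma short_nodup (xs : List Int) (h : xs.length ≤ 1) : xs.Nodup := by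
  rcases xs with _ | ⟨a, _ | ⟨b, t⟩⟩ <;> simp_all

-- ===== VERDICT (by name: the statement is the Claim_ definition above) =====
theorem solve_spec : Claim_unchanged_solve := by
  intro A B _hDom hnD
  unfold solve solve_alt
  set s := PySem.List.sorted A (fun x => x) false with hsdef
  have hperm : s.Perm A := PySem.List.sorted_perm A (fun x => x) false
  have hs : s.Pairwise (· ≤ ·) := PySem.List.sorted_pairwise A (fun x => x)
  rcases lt_trichotomy B 0 with hB | hB | hB
  · -- B < 0: both sides return 0
    rw [if_pos hB]
    exact loop_neg B s hB (2 * s.length + 1) 0 1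
  · -- B = 0
    subst hB
    rw [if_neg (by omega), if_pos rfl]
    by_cases hnd : A.Nodup
    · -- no duplicates: both 0
      have hnds : s.Nodup := hperm.nodup_iff.mpr hnd
      rw [PySem.Set.ofList_eq_self_of_nodup s hnds, if_neg (by omega)]
      rcases loop01 0 s (2 * s.length + 1) 0 1 with h0 | h1
      · exact h0
      · exfalso
        obtain ⟨p, q, hp, hq, hpq, habs⟩ := loop_sound 0 s (2 * s.length + 1) 0 1 h1
        rw [abs_eq_zero, sub_eq_zero, List.getD_eq_getElem s 0 hq, List.getD_eq_getElem s 0 hp] at habs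
        exact hpq ((List.Nodup.getElem_inj_iff hnds).mp habs.symm)
    · -- duplicates: both 1
      have hlen2 : 2 ≤ s.length := by
        by_contra hc
        exact hnd (hperm.nodup_iff.mp (short_nodup s (by omega)))
      rw [if_pos (ofList_len_lt s (fun h => hnd (hperm.nodup_iff.mp h)))]
      unfold D_solve at hnD
      push Not at hnD
      rw [← hsdef] at hnD
      by_cases h01 : s.getD 0 0 = s.getD 1 0
      · exact loopB0_hit s hlen2 (Or.inl h01)
      · have h12 : s.getD 1 0 = s.getD 2 0 := by
          by_contra h12
          exact h12 (hnD rfl hnd (fun e => h01 e))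
        have h2 : 2 < s.length := by
          by_contra h2
          have hl2 : s.length = 2 := by omega
          obtain ⟨a, b, hab⟩ := List.length_eq_two.mp hl2
          have hnds : ¬ s.Nodup := fun h => hnd (hperm.nodup_iff.mp h)
          rw [hab] at hnds h01
          have hae : a = b := by simpa [List.nodup_cons] using hnds
          exact h01 (by simp [List.getD, hae])
        exact loopB0_hit s hlen2 (Or.inr ⟨h2, h01, h12⟩)
  · -- B > 0
    rw [if_neg (by omega), if_neg (by omega)]
    have hmem_iff : ∀ x : Int, x ∈ PySem.Set.ofList s ↔ x ∈ s := fun x => PySem.Set.mem_ofList s x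
    rcases loop01 B s (2 * s.length + 1) 0 1 with h0 | h1
    · -- loop returns 0: no value x with x + B present
      rw [h0, if_neg]
      intro hany
      obtain ⟨x, hx, hxB⟩ := List.any_eq_true.mp hany
      rw [PySem.Set.contains_iff, hmem_iff] at hxB
      rw [hmem_iff] at hx
      obtain ⟨a, ha, hae⟩ := List.mem_iff_getElem.mp hx
      obtain ⟨b, hb, hbe⟩ := List.mem_iff_getElem.mp hxB
      have hab : a ≠ b := by
        intro e; subst e; rw [hae] at hbe; omega
      have hcomp := loop_complete B s hs hB (2 * s.length + 1) 0 1 (by omega) (by omega) h0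
      rcases Nat.lt_or_ge a b with hlt | hge
      · exact hcomp a b (by omega) hlt (by omega) hb
          (by rw [List.getD_eq_getElem s 0 hb, List.getD_eq_getElem s 0 ha, hae, hbe]; ring)
      · have hba : b < a := by omega
        have hmono : s.getD b 0 ≤ s.getD a 0 := getD_mono s hs (by omega) ha
        rw [List.getD_eq_getElem s 0 hb, List.getD_eq_getElem s 0 ha, hae, hbe] at hmono
        omega
    · -- loop returns 1: it saw a pair, so the membership scan succeeds
      rw [h1, if_pos]
      obtain ⟨p, q, hp, hq, hpq, habs⟩ := loop_sound B s (2 * s.length + 1) 0 1 h1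
      rw [abs_eq (by omega)] at habs
      rcases habs with he | he
      · refine List.any_eq_true.mpr ⟨s.getD p 0, ?_, ?_⟩
        · rw [hmem_iff]; exact getD_mem_self s hp
        · rw [PySem.Set.contains_iff, hmem_iff]
          have hq' : s.getD p 0 + B = s.getD q 0 := by omega
          rw [hq']; exact getD_mem_self s hq
      · refine List.any_eq_true.mpr ⟨s.getD q 0, ?_, ?_⟩
        · rw [hmem_iff]; exact getD_mem_self s hq
        · rw [PySem.Set.contains_iff, hmem_iff]
          have hp' : s.getD q 0 + B = s.getD p 0 := by omega
          rw [hp']; exact getD_mem_self s hp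

theorem solve_changed : Claim_changed_solve := by unfold Claim_changed_solve; decide

theorem solve_tight : Claim_exact_solve := by
  intro A B _hDom hDd
  obtain ⟨hB0, hnd, h01, h12⟩ := hDd
  subst hB0
  unfold solve solve_alt
  set s := PySem.List.sorted A (fun x => x) false with hsdef
  have hperm : s.Perm A := PySem.List.sorted_perm A (fun x => x) false
  have hs : s.Pairwise (· ≤ ·) := PySem.List.sorted_pairwise A (fun x => x)
  rw [loopB0_miss s hs h01 h12]
  rw [if_neg (by omega), if_pos rfl,
    if_pos (ofList_len_lt s (fun h => hnd (hperm.nodup_iff.mp h)))]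
  omega
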